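-- pv_equiv track=rewrite | github.com/rschwa6308/Misc | Advent of Code 2019/Day_3_A.py | steps_to_wire_partial
-- ===== SOURCE A (Python) =====
-- def steps_to_wire_partial(steps):
--     wire = [(0, 0)]
--     x, y = 0, 0
--     for (direction, count) in steps:
--         if direction == "U":
--             y += count
--         elif direction == "D":
--             y -= count
--         elif direction == "L":
--             x -= count
--         elif direction == "R":
--             x += count
--         wire.append((x, y))
--     return wire
-- ===== SOURCE B (Python) =====
-- _DELTA = {"U": (0, 1), "D": (0, -1), "L": (-1, 0), "R": (1, 0)}
--
--
-- def _prefix(vals):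
--     total = 0
--     out = [0]
--     for v in vals:
--         total += v
--         out.append(total)
--     return out
--
--
-- def steps_to_wire_partial(steps):
--     scaled = [(dx * c, dy * c)
--               for (d, c) in steps
--               for (dx, dy) in (_DELTA.get(d, (0, 0)),)]
--     return list(zip(_prefix([dx for dx, _ in scaled]),
--                     _prefix([dy for _, dy in scaled])))
-- ===== Notes on version B (the rewrite author's own statement) =====
-- stated objective: alternative
-- what changed: Replaces A's fused branch-and-append loop with a map-then-scan pipeline: each step is mapped through a direction->delta table to a scaled delta, then the x and y coordinates are prefix-summed independently and zipped into the vertex list.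
import Mathlib
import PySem

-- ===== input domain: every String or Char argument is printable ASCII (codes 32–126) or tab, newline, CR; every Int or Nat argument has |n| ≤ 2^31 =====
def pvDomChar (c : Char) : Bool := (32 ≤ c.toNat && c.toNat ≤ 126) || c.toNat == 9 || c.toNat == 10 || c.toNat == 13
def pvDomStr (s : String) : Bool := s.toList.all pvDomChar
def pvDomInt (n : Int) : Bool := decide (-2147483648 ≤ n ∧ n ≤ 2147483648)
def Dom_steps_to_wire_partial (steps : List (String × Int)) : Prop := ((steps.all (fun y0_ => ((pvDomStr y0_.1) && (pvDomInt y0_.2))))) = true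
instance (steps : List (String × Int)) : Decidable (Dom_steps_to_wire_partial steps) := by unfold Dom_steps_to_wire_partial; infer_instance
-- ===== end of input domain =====

-- B restructures A's fused branch-and-append loop into a map-then-scan pipeline (delta table, then independent x/y prefix sums zipped); same values, objective: alternative decomposition.

-- ===== PORT A =====
-- A: one loop carrying (wire, x, y); the if/elif chain updates x,y, then appends (x, y).
def steps_to_wire_partial (steps : List (String × Int)) : List (Int × Int) :=
  (steps.foldl (fun (st : List (Int × Int) × Int × Int) dc =>
      let wire := st.1
      let x := st.2.1
      let y := st.2.2
      let d := dc.1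
      let c := dc.2
      let xy : Int × Int :=
        if d == "U" then (x, y + c)
        else if d == "D" then (x, y - c)
        else if d == "L" then (x - c, y)
        else if d == "R" then (x + c, y)
        else (x, y)
      (wire ++ [xy], xy)) ([(0, 0)], 0, 0)).1

-- ===== PORT B =====
-- B's direction → unit-delta table (_DELTA in Source B)
def pvDeltaTable : PySem.Dict String (Int × Int) :=
  PySem.Dict.ofList [("U", (0, 1)), ("D", (0, -1)), ("L", (-1, 0)), ("R", (1, 0))]

-- B's _prefix: running-sum loop (total = 0; out = [0]; append total + v each step)
def pvPrefixGo (total : Int) (vals : List Int) : List Int :=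
  match vals with
  | [] => []
  | v :: rest => (total + v) :: pvPrefixGo (total + v) rest

def pvPrefix (vals : List Int) : List Int := 0 :: pvPrefixGo 0 vals

def steps_to_wire_partial_alt (steps : List (String × Int)) : List (Int × Int) :=
  let scaled := steps.map (fun dc =>
    let p := pvDeltaTable.getD dc.1 (0, 0)
    (p.1 * dc.2, p.2 * dc.2))
  List.zip (pvPrefix (scaled.map (·.1))) (pvPrefix (scaled.map (·.2)))

-- ===== PRECONDITION & SPEC =====
def Spec_steps_to_wire_partial (steps : List (String × Int)) (out : List (Int × Int)) : Prop := out = steps_to_wire_partial_alt steps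
instance (steps : List (String × Int)) (out : List (Int × Int)) : Decidable (Spec_steps_to_wire_partial steps out) := by unfold Spec_steps_to_wire_partial; infer_instance

-- ===== CLAIM (what is proved, stated in full; the proofs are below) =====
def Claim_equal_steps_to_wire_partial : Prop := ∀ (steps : List (String × Int)), Dom_steps_to_wire_partial steps → Spec_steps_to_wire_partial steps (steps_to_wire_partial steps)

-- ===== LEMMAS AND PROOFS =====

-- A's if/elif update equals adding the scaled table delta.
theorem pv_step_eq (d : String) (c x y : Int) :
    (if d == "U" then (x, y + c)
     else if d == "D" then (x, y - c)
     else if d == "L" then (x - c, y)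
     else if d == "R" then (x + c, y)
     else (x, y)) =
    (x + (pvDeltaTable.getD d (0, 0)).1 * c,
     y + (pvDeltaTable.getD d (0, 0)).2 * c) := by
  have eU : pvDeltaTable.getD "U" (0, 0) = (0, 1) := by decide
  have eD : pvDeltaTable.getD "D" (0, 0) = (0, -1) := by decide
  have eL : pvDeltaTable.getD "L" (0, 0) = (-1, 0) := by decide
  have eR : pvDeltaTable.getD "R" (0, 0) = (1, 0) := by decide
  by_cases hU : d = "U"
  · subst hU; simp [eU]
  by_cases hD : d = "D"
  · subst hD; simp [eD]; ring
  by_cases hL : d = "L"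
  · subst hL; simp [eL]; ring
  by_cases hR : d = "R"
  · subst hR; simp [eR]
  have e0 : pvDeltaTable.getD d (0, 0) = (0, 0) := by
    have e : pvDeltaTable = PySem.Dict.mk
        [("U", (0, 1)), ("D", (0, -1)), ("L", (-1, 0)), ("R", (1, 0))] := by decide
    simp [e, PySem.Dict.getD, PySem.Dict.get?, beq_iff_eq,
      Ne.symm hU, Ne.symm hD, Ne.symm hL, Ne.symm hR]
  simp [beq_iff_eq, hU, hD, hL, hR, e0]

-- The loop of A, started at an arbitrary wire/x/y, produces wire ++ zipped prefix sums.
theorem pv_fold_eq (steps : List (String × Int)) :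
    ∀ (wire : List (Int × Int)) (x y : Int),
    (steps.foldl (fun (st : List (Int × Int) × Int × Int) dc =>
      let w := st.1
      let x := st.2.1
      let y := st.2.2
      let d := dc.1
      let c := dc.2
      let xy : Int × Int :=
        if d == "U" then (x, y + c)
        else if d == "D" then (x, y - c)
        else if d == "L" then (x - c, y)
        else if d == "R" then (x + c, y)
        else (x, y)
      (w ++ [xy], xy)) (wire, x, y)).1 =
    wire ++ List.zip
      (pvPrefixGo x ((steps.map (fun dc =>
        let p := pvDeltaTable.getD dc.1 (0, 0)
        (p.1 * dc.2, p.2 * dc.2))).map (·.1)))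
      (pvPrefixGo y ((steps.map (fun dc =>
        let p := pvDeltaTable.getD dc.1 (0, 0)
        (p.1 * dc.2, p.2 * dc.2))).map (·.2))) := by
  induction steps with
  | nil => intro wire x y; simp [pvPrefixGo]
  | cons hd tl ih =>
    intro wire x y
    simp only [List.foldl_cons, List.map_cons, pvPrefixGo]
    rw [pv_step_eq hd.1 hd.2 x y, ih]
    simp [List.zip]

-- ===== VERDICT (by name: the statement is the Claim_ definition above) =====
theorem steps_to_wire_partial_spec : Claim_equal_steps_to_wire_partial := by
  intro steps _
  unfold Spec_steps_to_wire_partial steps_to_wire_partial steps_to_wire_partial_alt pvPrefix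
  rw [pv_fold_eq steps [(0, 0)] 0 0]
  simp [List.zip]
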